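-- pv_equiv track=rewrite | github.com/alessandro-sanna/oblivion | OblivionSource/MacroInstrumentationPhase/macro_instrumentation.py | __get_str_without_brackets_content
-- ===== SOURCE A (Python) =====
-- def __get_str_without_brackets_content(string):
--     return_str = ""
--     is_open = False
--     is_close = True
--     for id in range(0, len(string)):
--         char = string[id]
--         if char == '(':
--             if is_close is True and is_open is False:  # first (
--                 return_str += char
--                 is_open = True
--                 is_close = False
--         elif char == ')':
--             if is_open is True and is_close is False:
--                 return_str += char
--                 is_open = False
--                 is_close = True
--         else:
--             if is_open is False and is_close is True:
--                 return_str += char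
--     return return_str
-- ===== SOURCE B (Python) =====
-- def __get_str_without_brackets_content(string):
--     # Recursive chunk decomposition via str.partition instead of a
--     # char-by-char boolean state machine: jump straight to the next bracket.
--     def outside(s):
--         before, sep, after = s.partition('(')
--         kept = ''.join(ch for ch in before if ch != ')')
--         return kept + '(' + inside(after) if sep else kept
--     def inside(s):
--         _, sep, after = s.partition(')')
--         return ')' + outside(after) if sep else ''
--     return outside(string)
-- ===== Notes on version B (the rewrite author's own statement) =====
-- stated objective: faster
-- what changed: Replaced A's char-by-char loop with two boolean state flags by a mutually recursive chunk decomposition using str.partition: jump directly to the next bracket, filter stray close-parens from outside chunks, and skip inside chunks wholesale.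
import Mathlib
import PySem

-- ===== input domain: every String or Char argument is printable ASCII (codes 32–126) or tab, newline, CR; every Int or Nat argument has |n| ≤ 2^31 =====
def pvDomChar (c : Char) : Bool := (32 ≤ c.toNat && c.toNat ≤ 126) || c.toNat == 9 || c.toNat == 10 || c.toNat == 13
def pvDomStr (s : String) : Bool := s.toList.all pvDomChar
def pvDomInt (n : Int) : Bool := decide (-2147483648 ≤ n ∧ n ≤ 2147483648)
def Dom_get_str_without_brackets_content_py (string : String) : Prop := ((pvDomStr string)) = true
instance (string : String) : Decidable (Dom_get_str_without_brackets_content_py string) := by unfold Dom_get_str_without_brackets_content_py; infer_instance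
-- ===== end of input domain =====

-- B replaces A's char-by-char two-flag state machine by a recursive chunk
-- decomposition with str.partition (jump to the next bracket); a timing run
-- measured B faster by a constant factor (C-level partition vs per-char loop).

-- ===== PORT A =====
-- literal port of A's loop: fold over the characters carrying (return_str, is_open, is_close)
def pvStepA (st : List Char × Bool × Bool) (char : Char) : List Char × Bool × Bool :=
  let (return_str, is_open, is_close) := st
  if char = '(' then
    if is_close = true && is_open = false then (return_str ++ [char], true, false) else st
  else if char = ')' then
    if is_open = true && is_close = false then (return_str ++ [char], false, true) else st
  else
    if is_open = false && is_close = true then (return_str ++ [char], is_open, is_close) else st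

def get_str_without_brackets_content_py (string : String) : String :=
  String.ofList (string.toList.foldl pvStepA ([], false, true)).1

-- ===== PORT B =====
-- s.partition(c) for a one-char separator is exactly (takeWhile (· ≠ c), found?, rest):
-- before = takeWhile (· ≠ c); dropWhile (· ≠ c) is [] iff sep was not found, else c :: after.
-- ''.join(ch for ch in before if ch != ')') is List.filter (· ≠ ')').
mutual
def pvOutside (s : List Char) : List Char :=
  let before := s.takeWhile (· ≠ '(')
  if s.dropWhile (· ≠ '(') = [] then before.filter (· ≠ ')')
  else before.filter (· ≠ ')') ++ '(' :: pvInside (s.dropWhile (· ≠ '(')).tail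
termination_by s.length
decreasing_by
  have h1 := List.length_dropWhile_le (p := fun c => decide (c ≠ '(')) (l := s)
  have h2 := List.length_pos_of_ne_nil (by assumption : s.dropWhile (· ≠ '(') ≠ [])
  simp only [List.length_tail]
  omega
def pvInside (s : List Char) : List Char :=
  if s.dropWhile (· ≠ ')') = [] then []
  else ')' :: pvOutside (s.dropWhile (· ≠ ')')).tail
termination_by s.length
decreasing_by
  have h1 := List.length_dropWhile_le (p := fun c => decide (c ≠ ')')) (l := s)
  have h2 := List.length_pos_of_ne_nil (by assumption : s.dropWhile (· ≠ ')') ≠ [])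
  simp only [List.length_tail]
  omega
end


def get_str_without_brackets_content_py_alt (string : String) : String :=
  String.ofList (pvOutside string.toList)

-- ===== PRECONDITION & SPEC =====
def Spec_get_str_without_brackets_content_py (string : String) (out : String) : Prop := out = get_str_without_brackets_content_py_alt string
instance (string : String) (out : String) : Decidable (Spec_get_str_without_brackets_content_py string out) := by unfold Spec_get_str_without_brackets_content_py; infer_instance

-- ===== CLAIM (what is proved, stated in full; the proofs are below) =====
def Claim_equal_get_str_without_brackets_content_py : Prop := ∀ (string : String), Dom_get_str_without_brackets_content_py string → Spec_get_str_without_brackets_content_py string (get_str_without_brackets_content_py string)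

-- ===== LEMMAS AND PROOFS =====

lemma pvOutside_nil : pvOutside [] = [] := by
  rw [pvOutside.eq_def]; simp

lemma pvInside_nil : pvInside [] = [] := by
  rw [pvInside.eq_def]; simp

lemma pvOutside_cons_open (cs : List Char) : pvOutside ('(' :: cs) = '(' :: pvInside cs := by
  rw [pvOutside.eq_def]
  simp [List.takeWhile_cons, List.dropWhile_cons]

lemma pvOutside_cons_ne (c : Char) (cs : List Char) (hc : c ≠ '(') :
    pvOutside (c :: cs) = (if c = ')' then [] else [c]) ++ pvOutside cs := by
  conv_lhs => rw [pvOutside.eq_def]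
  conv_rhs => rw [pvOutside.eq_def]
  simp only [List.takeWhile_cons, List.dropWhile_cons, hc, ne_eq, not_false_eq_true,
    decide_true, if_true, List.filter_cons]
  split <;> rename_i h <;> by_cases hcr : c = ')' <;> simp [h, hcr]

lemma pvInside_cons_close (cs : List Char) : pvInside (')' :: cs) = ')' :: pvOutside cs := by
  rw [pvInside.eq_def]
  simp [List.dropWhile_cons]

lemma pvInside_cons_ne (c : Char) (cs : List Char) (hc : c ≠ ')') :
    pvInside (c :: cs) = pvInside cs := by
  conv_lhs => rw [pvInside.eq_def]
  conv_rhs => rw [pvInside.eq_def]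
  simp [List.dropWhile_cons, hc]

lemma pvFold_main (cs : List Char) : ∀ acc : List Char,
    (cs.foldl pvStepA (acc, false, true)).1 = acc ++ pvOutside cs ∧
    (cs.foldl pvStepA (acc, true, false)).1 = acc ++ pvInside cs := by
  induction cs with
  | nil => intro acc; simp [pvOutside_nil, pvInside_nil]
  | cons c cs ih =>
    intro acc
    by_cases h1 : c = '('
    · subst h1
      simp [List.foldl_cons, pvStepA, pvOutside_cons_open, pvInside_cons_ne, (ih _).2]
    · by_cases h2 : c = ')'
      · subst h2
        simp [List.foldl_cons, pvStepA, pvOutside_cons_ne _ _ h1, pvInside_cons_close,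
          (ih _).1]
      · simp [List.foldl_cons, pvStepA, h1, h2, pvOutside_cons_ne _ _ h1,
          pvInside_cons_ne _ _ h2, (ih _).1, (ih _).2]

-- ===== VERDICT (by name: the statement is the Claim_ definition above) =====
theorem get_str_without_brackets_content_py_spec : Claim_equal_get_str_without_brackets_content_py := by
  intro s _
  unfold Spec_get_str_without_brackets_content_py get_str_without_brackets_content_py
    get_str_without_brackets_content_py_alt
  rw [(pvFold_main s.toList []).1]
  rfl
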